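-- pv_equiv track=rewrite | github.com/maryyang1234/hello-world | 找到两个数字之间的最小距离.py | findMindis
-- ===== SOURCE A (Python) =====
-- def findMindis(arr,x,y):
--     m = len(arr)
--
--     for i in range(0,len(arr)):
--         mi = 99999
--         if  arr[i] == x or arr[i] == y:
--             for j in range(i, len(arr)):
--                 if arr[j] != arr[i] and (arr[j] == x or arr[j] == y):
--                     mi = j-i
--                     if mi<m:
--                         m=mi
--
--     return m
-- ===== SOURCE B (Python) =====
-- def findMindis(arr, x, y):
--     # Single pass: track the index of the most recent x and most recent y seen;
--     # each element closes at most one candidate gap (to the nearest opposite value).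
--     m = len(arr)
--     last_x = None
--     last_y = None
--     for i, v in enumerate(arr):
--         if v == x:
--             if last_y is not None and i - last_y < m:
--                 m = i - last_y
--             last_x = i
--         elif v == y:
--             if last_x is not None and i - last_x < m:
--                 m = i - last_x
--             last_y = i
--     return m
-- ===== Notes on version B (the rewrite author's own statement) =====
-- stated objective: alternative
-- what changed: Replaced the nested scan over all index pairs by a single pass that keeps the index of the most recent x and most recent y and minimizes the gap to the nearest opposite occurrence.
import Mathlib
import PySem

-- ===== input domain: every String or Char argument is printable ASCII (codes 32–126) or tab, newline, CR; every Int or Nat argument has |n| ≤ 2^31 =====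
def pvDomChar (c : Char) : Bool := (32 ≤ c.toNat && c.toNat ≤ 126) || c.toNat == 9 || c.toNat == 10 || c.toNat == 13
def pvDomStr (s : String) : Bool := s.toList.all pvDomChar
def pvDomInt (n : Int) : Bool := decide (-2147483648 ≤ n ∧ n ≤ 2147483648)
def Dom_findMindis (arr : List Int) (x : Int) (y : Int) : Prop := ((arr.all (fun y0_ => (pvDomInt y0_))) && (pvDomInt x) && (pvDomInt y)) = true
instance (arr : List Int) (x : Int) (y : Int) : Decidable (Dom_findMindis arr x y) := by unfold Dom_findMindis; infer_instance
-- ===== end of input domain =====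

-- B replaces A's nested scan over all index pairs by a single pass that tracks the
-- last seen index of x and of y (objective: alternative single-pass algorithm).

-- ===== PORT A =====
-- Literal port of A's nested index loops.  arr[i]/arr[j] are always in range
-- (i, j come from range(len(arr))), so pyGetD is exact here.  The assignment
-- 'mi = 99999' at the top of the outer loop is dead (mi is always overwritten
-- before being read), so it leaves no trace in the port.
def findMindis (arr : List Int) (x : Int) (y : Int) : Int :=
  (PySem.List.pyRange 0 (arr.length : Int) 1).foldl (fun m i =>
    if PySem.List.pyGetD arr i 0 = x ∨ PySem.List.pyGetD arr i 0 = y then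
      (PySem.List.pyRange i (arr.length : Int) 1).foldl (fun m2 j =>
        if PySem.List.pyGetD arr j 0 ≠ PySem.List.pyGetD arr i 0 ∧
           (PySem.List.pyGetD arr j 0 = x ∨ PySem.List.pyGetD arr j 0 = y) then
          if j - i < m2 then j - i else m2
        else m2) m
    else m) (arr.length : Int)

-- ===== PORT B =====
-- Literal port of B's single pass ('for i, v in enumerate(arr)') with state
-- (m, last_x, last_y); None becomes Option.none.
def altGo (x : Int) (y : Int) (m : Int) (lx : Option Int) (ly : Option Int) :
    List (Int × Int) → Int
  | [] => m
  | (i, v) :: rest =>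
    if v = x then
      altGo x y (match ly with
        | some l => if i - l < m then i - l else m
        | none => m) (some i) ly rest
    else if v = y then
      altGo x y (match lx with
        | some l => if i - l < m then i - l else m
        | none => m) lx (some i) rest
    else
      altGo x y m lx ly rest

def findMindis_alt (arr : List Int) (x : Int) (y : Int) : Int :=
  altGo x y (arr.length : Int) none none (PySem.List.enumerate arr 0)

-- ===== PRECONDITION & SPEC =====
def Spec_findMindis (arr : List Int) (x : Int) (y : Int) (out : Int) : Prop := out = findMindis_alt arr x y
instance (arr : List Int) (x : Int) (y : Int) (out : Int) : Decidable (Spec_findMindis arr x y out) := by unfold Spec_findMindis; infer_instance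

-- ===== CLAIM (what is proved, stated in full; the proofs are below) =====
def Claim_equal_findMindis : Prop := ∀ (arr : List Int) (x : Int) (y : Int), Dom_findMindis arr x y → Spec_findMindis arr x y (findMindis arr x y)

-- ===== LEMMAS AND PROOFS =====

-- proof-layer abbreviation for arr[k]
def pvG (arr : List Int) (k : Int) : Int := PySem.List.pyGetD arr k 0

-- (p, q) is a valid pair of indices holding the two distinct target values
def pvOk (arr : List Int) (x y p q : Int) : Prop :=
  0 ≤ p ∧ p < q ∧ q < (arr.length : Int) ∧
  (pvG arr p = x ∨ pvG arr p = y) ∧ (pvG arr q = x ∨ pvG arr q = y) ∧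
  pvG arr p ≠ pvG arr q

-- generic lemmas about foldl with a non-increasing Int accumulator
theorem pv_foldl_le_init {β : Type} (f : Int → β → Int) (h : ∀ m i, f m i ≤ m) :
    ∀ (l : List β) (a : Int), List.foldl f a l ≤ a := by
  intro l
  induction l with
  | nil => intro a; simp
  | cons hd tl ih => intro a; exact le_trans (ih (f a hd)) (h a hd)

theorem pv_foldl_le_elem {β : Type} (f : Int → β → Int) (h : ∀ m i, f m i ≤ m)
    {i : β} {b : Int} (hb : ∀ m, f m i ≤ b) :
    ∀ (l : List β) (a : Int), i ∈ l → List.foldl f a l ≤ b := by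
  intro l
  induction l with
  | nil => intro a hmem; simp at hmem
  | cons hd tl ih =>
    intro a hmem
    rcases List.mem_cons.1 hmem with hEq | hmem'
    · subst hEq
      exact le_trans (pv_foldl_le_init f h tl (f a i)) (hb a)
    · exact ih (f a hd) hmem'

theorem pv_le_foldl {β : Type} (f : Int → β → Int) {c : Int} :
    ∀ (l : List β) (a : Int), c ≤ a → (∀ m i, i ∈ l → c ≤ m → c ≤ f m i) →
    c ≤ List.foldl f a l := by
  intro l
  induction l with
  | nil => intro a hc _; simpa
  | cons hd tl ih =>
    intro a hc h
    exact ih (f a hd) (h a hd (List.mem_cons_self) hc)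
      (fun m i hi hm => h m i (List.mem_cons_of_mem _ hi) hm)

-- A-side characterisation
-- every step of A's loops can only decrease the accumulator
theorem pvA_step_le (arr : List Int) (x y : Int) :
    ∀ (m i : Int),
      (if PySem.List.pyGetD arr i 0 = x ∨ PySem.List.pyGetD arr i 0 = y then
        (PySem.List.pyRange i (arr.length : Int) 1).foldl (fun m2 j =>
          if PySem.List.pyGetD arr j 0 ≠ PySem.List.pyGetD arr i 0 ∧
             (PySem.List.pyGetD arr j 0 = x ∨ PySem.List.pyGetD arr j 0 = y) then
            if j - i < m2 then j - i else m2
          else m2) m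
      else m) ≤ m := by
  intro m i
  split
  · exact pv_foldl_le_init _ (by intro m2 j; split_ifs <;> omega) _ m
  · exact le_refl m

theorem pvA_le_len (arr : List Int) (x y : Int) :
    findMindis arr x y ≤ (arr.length : Int) := by
  unfold findMindis
  exact pv_foldl_le_init _ (pvA_step_le arr x y) _ _

theorem pvA_le_gap (arr : List Int) (x y p q : Int) (h : pvOk arr x y p q) :
    findMindis arr x y ≤ q - p := by
  obtain ⟨h0p, hpq, hqn, hpv, hqv, hne⟩ := h
  simp only [pvG] at hpv hqv hne
  unfold findMindis
  apply pv_foldl_le_elem _ (pvA_step_le arr x y) (i := p) (b := q - p)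
  · -- the outer step at i = p pushes the accumulator to ≤ q - p
    intro m
    rw [if_pos hpv]
    apply pv_foldl_le_elem _ (by intro m2 j; split_ifs <;> omega)
      (i := q) (b := q - p)
    · intro m2
      rw [if_pos ⟨fun hEq => hne (hEq.symm), hqv⟩]
      split_ifs <;> omega
    · exact (PySem.List.mem_pyRange_one).2 ⟨le_of_lt hpq, hqn⟩
  · exact (PySem.List.mem_pyRange_one).2 ⟨h0p, by omega⟩

theorem pvA_ge (arr : List Int) (x y c : Int) (h1 : c ≤ (arr.length : Int))
    (h2 : ∀ p q, pvOk arr x y p q → c ≤ q - p) : c ≤ findMindis arr x y := by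
  unfold findMindis
  apply pv_le_foldl _ _ _ h1
  intro m i hi hm
  have hi' := (PySem.List.mem_pyRange_one).1 hi
  split
  case isTrue hiv =>
    apply pv_le_foldl _ _ _ hm
    intro m2 j hj hm2
    have hj' := (PySem.List.mem_pyRange_one).1 hj
    split
    case isTrue hjc =>
      have hij : i < j := by
        rcases lt_or_eq_of_le hj'.1 with hlt | hEq
        · exact hlt
        · exact absurd (hEq ▸ rfl) hjc.1
      have : c ≤ j - i := h2 i j ⟨hi'.1, hij, hj'.2, hiv, hjc.2, fun hEq => hjc.1 (by simpa [pvG] using hEq.symm)⟩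
      split_ifs <;> omega
    case isFalse => exact hm2
  case isFalse => exact hm

-- last-seen invariant: what lx/ly mean after processing indices < i
def pvInv (occ : Int → Prop) (i : Int) : Option Int → Prop
  | none => ∀ k, 0 ≤ k → k < i → ¬ occ k
  | some l => 0 ≤ l ∧ l < i ∧ occ l ∧ ∀ k, l < k → k < i → ¬ occ k

theorem pv_altGo_main (arr : List Int) (x y : Int) :
    ∀ (rest : List Int) (i m : Int) (lx ly : Option Int),
      0 ≤ i → arr.drop i.toNat = rest →
      pvInv (fun k => pvG arr k = x) i lx →
      pvInv (fun k => pvG arr k ≠ x ∧ pvG arr k = y) i ly →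
      (∀ p q, pvOk arr x y p q → q < i → m ≤ q - p) →
      (altGo x y m lx ly (PySem.List.enumerate rest i) ≤ m ∧
       (∀ p q, pvOk arr x y p q → altGo x y m lx ly (PySem.List.enumerate rest i) ≤ q - p) ∧
       (∀ c, c ≤ m → (∀ p q, pvOk arr x y p q → c ≤ q - p) →
         c ≤ altGo x y m lx ly (PySem.List.enumerate rest i))) := by
  intro rest
  induction rest with
  | nil =>
    intro i m lx ly hi hdrop _ _ hm
    have hn : (arr.length : Int) ≤ i := by
      have := congrArg List.length hdrop
      simp [List.length_drop] at this
      omega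
    simp only [PySem.List.enumerate_nil, altGo]
    exact ⟨le_refl m,
      fun p q hok => hm p q hok (by rcases hok with ⟨_, _, hq, _⟩; omega),
      fun c hc _ => hc⟩
  | cons v rest' ih =>
    intro i m lx ly hi hdrop hlx hly hm
    have hlenlt : i.toNat < arr.length := by
      have := congrArg List.length hdrop
      simp [List.length_drop] at this
      omega
    have hin : i < (arr.length : Int) := by omega
    have hv : pvG arr i = v := by
      have h1 : arr[i.toNat]? = some v := by
        have h0 : (List.drop i.toNat arr)[0]? = arr[i.toNat + 0]? := List.getElem?_drop
        rw [hdrop] at h0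
        simpa using h0.symm
      have h2 : pvG arr i = arr[i.toNat] := by
        simp only [pvG]
        exact PySem.List.pyGetD_eq_getElem arr 0 hi hin
      rw [h2]
      exact Option.some.inj ((List.getElem?_eq_getElem hlenlt).symm.trans h1)
    have hdrop' : arr.drop (i + 1).toNat = rest' := by
      have h4 := congrArg List.tail hdrop
      rw [List.tail_drop] at h4
      have h5 : (i + 1).toNat = i.toNat + 1 := by omega
      rw [h5]
      simpa using h4
    simp only [PySem.List.enumerate_cons, altGo]
    by_cases hvx : v = x
    · rw [if_pos hvx]
      have hgix : pvG arr i = x := hv.trans hvx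
      have hInvX : pvInv (fun k => pvG arr k = x) (i + 1) (some i) :=
        ⟨hi, by omega, hgix, fun k hk1 hk2 _ => by omega⟩
      cases ly with
      | none =>
        have hInvY : pvInv (fun k => pvG arr k ≠ x ∧ pvG arr k = y) (i + 1) none := by
          intro k hk0 hk1 hocc
          rcases (by omega : k < i ∨ k = i) with h | h
          · exact hly k hk0 h hocc
          · exact hocc.1 (h ▸ hgix)
        have hm' : ∀ p q, pvOk arr x y p q → q < i + 1 → m ≤ q - p := by
          intro p q hok hq
          obtain ⟨h0p, hpq, hqn, hpv', hqv', hne'⟩ := hok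
          rcases (by omega : q < i ∨ q = i) with hqi | hqi
          · exact hm p q ⟨h0p, hpq, hqn, hpv', hqv', hne'⟩ hqi
          · subst hqi
            have hgpx : pvG arr p ≠ x := fun hEq => hne' (hEq.trans hgix.symm)
            have hgpy : pvG arr p = y := hpv'.resolve_left hgpx
            exact absurd ⟨hgpx, hgpy⟩ (hly p h0p hpq)
        obtain ⟨c1, c2, c3⟩ := ih (i + 1) m (some i) none (by omega) hdrop' hInvX hInvY hm'
        exact ⟨c1, c2, fun c hc hg => c3 c hc hg⟩
      | some l =>
        obtain ⟨hl0, hli, hoccl, hlmax⟩ := hly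
        have hokli : pvOk arr x y l i :=
          ⟨hl0, hli, hin, Or.inr hoccl.2, Or.inl hgix,
           fun hEq => hoccl.1 (hEq.trans hgix)⟩
        have hInvY : pvInv (fun k => pvG arr k ≠ x ∧ pvG arr k = y) (i + 1) (some l) := by
          refine ⟨hl0, by omega, hoccl, ?_⟩
          intro k hk1 hk2 hocc
          rcases (by omega : k < i ∨ k = i) with h | h
          · exact hlmax k hk1 h hocc
          · exact hocc.1 (h ▸ hgix)
        have hm' : ∀ p q, pvOk arr x y p q → q < i + 1 →
            (if i - l < m then i - l else m) ≤ q - p := by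
          intro p q hok hq
          obtain ⟨h0p, hpq, hqn, hpv', hqv', hne'⟩ := hok
          rcases (by omega : q < i ∨ q = i) with hqi | hqi
          · have h5 := hm p q ⟨h0p, hpq, hqn, hpv', hqv', hne'⟩ hqi
            split_ifs <;> omega
          · subst hqi
            have hgpx : pvG arr p ≠ x := fun hEq => hne' (hEq.trans hgix.symm)
            have hgpy : pvG arr p = y := hpv'.resolve_left hgpx
            have hpl : p ≤ l := by
              by_contra hcon
              exact hlmax p (by omega) hpq ⟨hgpx, hgpy⟩
            split_ifs <;> omega
        obtain ⟨c1, c2, c3⟩ := ih (i + 1) (if i - l < m then i - l else m) (some i)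
          (some l) (by omega) hdrop' hInvX hInvY hm'
        refine ⟨le_trans c1 (by split_ifs <;> omega), c2, ?_⟩
        intro c hc hg
        have hcli : c ≤ i - l := hg l i hokli
        exact c3 c (by split_ifs <;> omega) hg
    · rw [if_neg hvx]
      by_cases hvy : v = y
      · rw [if_pos hvy]
        have hgiy : pvG arr i = y := hv.trans hvy
        have hgix : pvG arr i ≠ x := fun hEq => hvx (hv.symm.trans hEq)
        have hInvY : pvInv (fun k => pvG arr k ≠ x ∧ pvG arr k = y) (i + 1) (some i) :=
          ⟨hi, by omega, ⟨hgix, hgiy⟩, fun k hk1 hk2 _ => by omega⟩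
        cases lx with
        | none =>
          have hInvX : pvInv (fun k => pvG arr k = x) (i + 1) none := by
            intro k hk0 hk1 hocc
            rcases (by omega : k < i ∨ k = i) with h | h
            · exact hlx k hk0 h hocc
            · exact hgix (h ▸ hocc)
          have hm' : ∀ p q, pvOk arr x y p q → q < i + 1 → m ≤ q - p := by
            intro p q hok hq
            obtain ⟨h0p, hpq, hqn, hpv', hqv', hne'⟩ := hok
            rcases (by omega : q < i ∨ q = i) with hqi | hqi
            · exact hm p q ⟨h0p, hpq, hqn, hpv', hqv', hne'⟩ hqi
            · subst hqi
              have hgpy : pvG arr p ≠ y := fun hEq => hne' (hEq.trans hgiy.symm)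
              have hgpx : pvG arr p = x := hpv'.resolve_right hgpy
              exact absurd hgpx (hlx p h0p hpq)
          obtain ⟨c1, c2, c3⟩ := ih (i + 1) m none (some i) (by omega) hdrop' hInvX hInvY hm'
          exact ⟨c1, c2, fun c hc hg => c3 c hc hg⟩
        | some l =>
          obtain ⟨hl0, hli, hoccl, hlmax⟩ := hlx
          have hokli : pvOk arr x y l i :=
            ⟨hl0, hli, hin, Or.inl hoccl, Or.inr hgiy,
             fun hEq => hgix (hEq ▸ hoccl)⟩
          have hInvX : pvInv (fun k => pvG arr k = x) (i + 1) (some l) := by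
            refine ⟨hl0, by omega, hoccl, ?_⟩
            intro k hk1 hk2 hocc
            rcases (by omega : k < i ∨ k = i) with h | h
            · exact hlmax k hk1 h hocc
            · exact hgix (h ▸ hocc)
          have hm' : ∀ p q, pvOk arr x y p q → q < i + 1 →
              (if i - l < m then i - l else m) ≤ q - p := by
            intro p q hok hq
            obtain ⟨h0p, hpq, hqn, hpv', hqv', hne'⟩ := hok
            rcases (by omega : q < i ∨ q = i) with hqi | hqi
            · have h5 := hm p q ⟨h0p, hpq, hqn, hpv', hqv', hne'⟩ hqi
              split_ifs <;> omega
            · subst hqi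
              have hgpy : pvG arr p ≠ y := fun hEq => hne' (hEq.trans hgiy.symm)
              have hgpx : pvG arr p = x := hpv'.resolve_right hgpy
              have hpl : p ≤ l := by
                by_contra hcon
                exact hlmax p (by omega) hpq hgpx
              split_ifs <;> omega
          obtain ⟨c1, c2, c3⟩ := ih (i + 1) (if i - l < m then i - l else m) (some l)
            (some i) (by omega) hdrop' hInvX hInvY hm'
          refine ⟨le_trans c1 (by split_ifs <;> omega), c2, ?_⟩
          intro c hc hg
          have hcli : c ≤ i - l := hg l i hokli
          exact c3 c (by split_ifs <;> omega) hg
      · rw [if_neg hvy]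
        have hInvX : pvInv (fun k => pvG arr k = x) (i + 1) lx := by
          cases lx with
          | none =>
            intro k hk0 hk1 hocc
            rcases (by omega : k < i ∨ k = i) with h | h
            · exact hlx k hk0 h hocc
            · exact hvx ((h ▸ hocc : pvG arr i = x) ▸ hv ▸ rfl)
          | some l =>
            obtain ⟨hl0, hli, hoccl, hlmax⟩ := hlx
            refine ⟨hl0, by omega, hoccl, ?_⟩
            intro k hk1 hk2 hocc
            rcases (by omega : k < i ∨ k = i) with h | h
            · exact hlmax k hk1 h hocc
            · exact hvx ((h ▸ hocc : pvG arr i = x) ▸ hv ▸ rfl)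
        have hInvY : pvInv (fun k => pvG arr k ≠ x ∧ pvG arr k = y) (i + 1) ly := by
          cases ly with
          | none =>
            intro k hk0 hk1 hocc
            rcases (by omega : k < i ∨ k = i) with h | h
            · exact hly k hk0 h hocc
            · exact hvy ((h ▸ hocc.2 : pvG arr i = y) ▸ hv ▸ rfl)
          | some l =>
            obtain ⟨hl0, hli, hoccl, hlmax⟩ := hly
            refine ⟨hl0, by omega, hoccl, ?_⟩
            intro k hk1 hk2 hocc
            rcases (by omega : k < i ∨ k = i) with h | h
            · exact hlmax k hk1 h hocc
            · exact hvy ((h ▸ hocc.2 : pvG arr i = y) ▸ hv ▸ rfl)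
        have hm' : ∀ p q, pvOk arr x y p q → q < i + 1 → m ≤ q - p := by
          intro p q hok hq
          obtain ⟨h0p, hpq, hqn, hpv', hqv', hne'⟩ := hok
          rcases (by omega : q < i ∨ q = i) with hqi | hqi
          · exact hm p q ⟨h0p, hpq, hqn, hpv', hqv', hne'⟩ hqi
          · subst hqi
            rcases hqv' with h | h
            · exact absurd (hv.symm.trans h) hvx
            · exact absurd (hv.symm.trans h) hvy
        exact ih (i + 1) m lx ly (by omega) hdrop' hInvX hInvY hm'

-- ===== VERDICT (by name: the statement is the Claim_ definition above) =====
theorem findMindis_spec : Claim_equal_findMindis := by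
  intro arr x y _
  unfold Spec_findMindis
  obtain ⟨hB1, hB2, hB3⟩ := pv_altGo_main arr x y arr 0 (arr.length : Int) none none
    (le_refl 0) (by simp)
    (by intro k hk hk'; omega)
    (by intro k hk hk'; omega)
    (by intro p q hok hq; exact absurd hq (by rcases hok with ⟨h1, h2, _⟩; omega))
  have hBA : findMindis_alt arr x y = altGo x y (arr.length : Int) none none (PySem.List.enumerate arr 0) := rfl
  apply le_antisymm
  · rw [hBA]
    exact hB3 (findMindis arr x y) (pvA_le_len arr x y)
      (fun p q hok => pvA_le_gap arr x y p q hok)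
  · exact pvA_ge arr x y (findMindis_alt arr x y) (hBA ▸ hB1)
      (fun p q hok => hBA ▸ hB2 p q hok)
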